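-- pv_equiv track=rewrite | github.com/elor666/Karayoke | sync_app/sync.py | merge_dup
-- ===== SOURCE A (Python) =====
-- def merge_dup(times,sentences):
--     merged_sentences = []
--     i = 0
--     while i < len(times):
--         current_time = times[i]
--         current_sentence = sentences[i]
--         j = i + 1
--         while j < len(times) and times[j] == current_time:
--             current_sentence += " " + sentences[j]
--             j += 1
--         merged_sentences.append(current_sentence.lower())
--         i = j
--     return merged_sentences
-- ===== SOURCE B (Python) =====
-- def merge_dup(times, sentences):
--     out = []
--     for k, (t, s) in enumerate(zip(times, sentences)):
--         if k > 0 and t == times[k - 1]: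
--             out[-1] += " " + s
--         else:
--             out.append(s)
--     return [x.lower() for x in out]
-- ===== Notes on version B (the rewrite author's own statement) =====
-- stated objective: simpler
-- what changed: Replaces the nested index-pointer while loops with a single forward pass over zip(times, sentences) that extends the last output entry on a repeated timestamp, lowercasing once at the end; Pre_ excludes len(sentences) < len(times), where A raises IndexError.
import Mathlib
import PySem

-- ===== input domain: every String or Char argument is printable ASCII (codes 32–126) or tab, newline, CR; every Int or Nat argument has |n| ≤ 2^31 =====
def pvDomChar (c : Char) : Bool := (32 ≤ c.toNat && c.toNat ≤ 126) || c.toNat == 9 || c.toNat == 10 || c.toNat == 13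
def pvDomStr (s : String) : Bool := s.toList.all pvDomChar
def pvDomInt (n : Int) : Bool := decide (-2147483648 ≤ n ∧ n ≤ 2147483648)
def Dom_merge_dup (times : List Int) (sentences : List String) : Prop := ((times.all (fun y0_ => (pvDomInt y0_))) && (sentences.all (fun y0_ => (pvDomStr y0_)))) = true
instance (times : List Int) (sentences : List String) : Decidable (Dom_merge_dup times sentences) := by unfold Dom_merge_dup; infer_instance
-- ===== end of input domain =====

-- B replaces A's nested index-pointer while loops by a single forward pass over the
-- zipped lists with an accumulator that extends the last entry on a repeated timestamp
-- (objective: simpler); same return value wherever A returns.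

-- ===== PORT A =====
-- inner while loop: while j < len(times) and times[j] == current_time: ...
def mergeDupInnerA (fuel : Nat) (times : List Int) (sents : List String)
    (ct : Int) (cs : String) (j : Nat) : String × Nat :=
  match fuel with
  | 0 => (cs, j)
  | fuel + 1 =>
    if j < times.length ∧ times.getD j 0 = ct then
      mergeDupInnerA fuel times sents ct (cs ++ " " ++ sents.getD j "") (j + 1)
    else (cs, j)

-- outer while loop: while i < len(times): ...  (fuel = len(times) suffices: i advances each round)
def mergeDupOuterA (fuel : Nat) (times : List Int) (sents : List String) (i : Nat) : List String :=
  match fuel with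
  | 0 => []
  | fuel + 1 =>
    if i < times.length then
      let ct := times.getD i 0
      let cs := sents.getD i ""
      let r := mergeDupInnerA times.length times sents ct cs (i + 1)
      PySem.Str.lower r.1 :: mergeDupOuterA fuel times sents r.2
    else []

def merge_dup (times : List Int) (sentences : List String) : List String :=
  mergeDupOuterA times.length times sentences 0

-- ===== PORT B =====
-- one pass over zip(times, sentences); prev = times[k-1] (none at k = 0);
-- the accumulator is kept reversed so that Python's out[-1] is its head.
def mergeDupLoopB (ps : List (Int × String)) (prev : Option Int) (acc : List String) : List String :=
  match ps with
  | [] => acc.reverse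
  | (t, s) :: rest =>
    if prev = some t then
      match acc with
      | a :: as => mergeDupLoopB rest (some t) ((a ++ " " ++ s) :: as)
      | [] => mergeDupLoopB rest (some t) [s]  -- unreachable: prev = some ⇒ acc ≠ []
    else
      mergeDupLoopB rest (some t) (s :: acc)

def merge_dup_alt (times : List Int) (sentences : List String) : List String :=
  (mergeDupLoopB (times.zip sentences) none []).map PySem.Str.lower

-- ===== PRECONDITION & SPEC =====
-- A reads sentences[i] for every i < len(times) and raises IndexError when sentences is
-- shorter; Pre_ excludes exactly those inputs.
def Pre_merge_dup (times : List Int) (sentences : List String) : Prop :=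
  times.length ≤ sentences.length

instance (times : List Int) (sentences : List String) : Decidable (Pre_merge_dup times sentences) := by
  unfold Pre_merge_dup; infer_instance

def pvWitness_merge_dup : List Int × List String := ([1, 1, 2], ["Ho", "La", "X y"])

def Spec_merge_dup (times : List Int) (sentences : List String) (out : List String) : Prop :=
  out = merge_dup_alt times sentences

instance (times : List Int) (sentences : List String) (out : List String) : Decidable (Spec_merge_dup times sentences out) := by
  unfold Spec_merge_dup; infer_instance

-- ===== CLAIM =====
def Claim_equal_merge_dup : Prop := ∀ (times : List Int) (sentences : List String),
  Dom_merge_dup times sentences → Pre_merge_dup times sentences →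
  Spec_merge_dup times sentences (merge_dup times sentences)

-- ===== LEMMAS AND PROOFS =====

-- canonical grouping of the zipped pairs: the common shape to which both ports are reduced
def mergeRun (t : Int) (cs : String) : List (Int × String) → String × List (Int × String)
  | [] => (cs, [])
  | (t', s') :: rest =>
    if t' = t then mergeRun t (cs ++ " " ++ s') rest
    else (cs, (t', s') :: rest)

theorem mergeRun_suffix (t : Int) (cs : String) (ps : List (Int × String)) :
    (mergeRun t cs ps).2 <:+ ps := by
  induction ps generalizing cs with
  | nil => simp [mergeRun]
  | cons p rest ih =>
    obtain ⟨t', s'⟩ := p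
    by_cases h : t' = t
    · simp only [mergeRun, if_pos h]
      exact (ih _).trans (List.suffix_cons _ _)
    · simp [mergeRun, h]

theorem mergeRun_length (t : Int) (cs : String) (ps : List (Int × String)) :
    (mergeRun t cs ps).2.length ≤ ps.length :=
  (mergeRun_suffix t cs ps).length_le

def mergeCanon : List (Int × String) → List String
  | [] => []
  | (t, s) :: rest =>
    (mergeRun t s rest).1 :: mergeCanon (mergeRun t s rest).2
termination_by ps => ps.length
decreasing_by
  exact Nat.lt_succ_of_le (mergeRun_length t s rest)

theorem suffix_drop_eq {α : Type} {l s : List α} (h : s <:+ l) :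
    l.drop (l.length - s.length) = s := by
  obtain ⟨p, rfl⟩ := h
  simp

-- B's loop mid-group state equals run + canon
theorem loopB_run (ps : List (Int × String)) :
    ∀ (t : Int) (cs : String) (acc : List String),
    mergeDupLoopB ps (some t) (cs :: acc)
      = acc.reverse ++ (mergeRun t cs ps).1 :: mergeCanon (mergeRun t cs ps).2 := by
  induction ps with
  | nil => intro t cs acc; simp [mergeDupLoopB, mergeRun, mergeCanon]
  | cons p rest ih =>
    intro t cs acc
    obtain ⟨t', s'⟩ := p
    by_cases h : t' = t
    · subst h
      simp only [mergeDupLoopB, mergeRun]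
      exact ih _ (cs ++ " " ++ s') acc
    · have hne : (some t : Option Int) ≠ some t' := by
        intro hc; exact h (Option.some.inj hc).symm
      simp only [mergeDupLoopB, if_neg hne, mergeRun, if_neg h]
      rw [ih t' s' (cs :: acc)]
      simp [mergeCanon]

theorem loopB_eq_canon (ps : List (Int × String)) :
    mergeDupLoopB ps none [] = mergeCanon ps := by
  cases ps with
  | nil => simp [mergeDupLoopB, mergeCanon]
  | cons p rest =>
    obtain ⟨t, s⟩ := p
    simp only [mergeDupLoopB, reduceCtorEq, if_false]
    rw [loopB_run rest t s []]
    simp [mergeCanon]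

-- A's inner loop equals run on the dropped zip, under Pre_
theorem innerA_eq_run (times : List Int) (sents : List String)
    (hlen : times.length ≤ sents.length) :
    ∀ (fuel j : Nat) (ct : Int) (cs : String),
      j ≤ times.length → times.length - j ≤ fuel →
      mergeDupInnerA fuel times sents ct cs j
        = ((mergeRun ct cs ((times.zip sents).drop j)).1,
           times.length - (mergeRun ct cs ((times.zip sents).drop j)).2.length) := by
  have hz : (times.zip sents).length = times.length := by
    simp [List.length_zip, Nat.min_eq_left hlen]
  intro fuel
  induction fuel with
  | zero =>
    intro j ct cs hj hf
    have hje : j = times.length := le_antisymm hj (by omega)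
    subst hje
    have hdrop : (times.zip sents).drop times.length = [] := by
      apply List.drop_eq_nil_of_le; omega
    simp [mergeDupInnerA, hdrop, mergeRun]
  | succ fuel ih =>
    intro j ct cs hj hf
    by_cases hjl : j < times.length
    · have hjs : j < sents.length := lt_of_lt_of_le hjl hlen
      have hjz : j < (times.zip sents).length := by omega
      have hdrop : (times.zip sents).drop j
          = (times[j], sents[j]) :: (times.zip sents).drop (j + 1) := by
        rw [List.drop_eq_getElem_cons hjz]
        congr 1
        simp [List.getElem_zip]
      by_cases heq : times.getD j 0 = ct
      · have hget : times[j] = ct := by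
          rwa [List.getD_eq_getElem _ _ hjl] at heq
        have hcond : j < times.length ∧ times.getD j 0 = ct := ⟨hjl, heq⟩
        rw [hdrop]
        simp only [mergeDupInnerA, if_pos hcond, mergeRun, if_pos hget,
          List.getD_eq_getElem _ _ hjs]
        exact ih (j + 1) ct (cs ++ " " ++ sents[j]) (by omega) (by omega)
      · have hget : ¬ times[j] = ct := by
          rwa [List.getD_eq_getElem _ _ hjl] at heq
        have hcond : ¬ (j < times.length ∧ times.getD j 0 = ct) := fun hc => heq hc.2
        rw [hdrop]
        simp only [mergeDupInnerA, if_neg hcond, mergeRun, if_neg hget]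
        have hrlen : ((times[j], sents[j]) :: (times.zip sents).drop (j + 1)).length
            = times.length - j := by
          simp [hz]; omega
        rw [hrlen]
        simp only [Prod.mk.injEq, true_and]
        omega
    · have hje : j = times.length := le_antisymm hj (by omega)
      subst hje
      have hdrop : (times.zip sents).drop times.length = [] := by
        apply List.drop_eq_nil_of_le; omega
      simp [mergeDupInnerA, hdrop, mergeRun]

-- A's outer loop equals canon (mapped with lower) on the dropped zip, under Pre_
theorem outerA_eq_canon (times : List Int) (sents : List String)
    (hlen : times.length ≤ sents.length) :
    ∀ (fuel i : Nat), times.length - i ≤ fuel →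
      mergeDupOuterA fuel times sents i
        = (mergeCanon ((times.zip sents).drop i)).map PySem.Str.lower := by
  have hz : (times.zip sents).length = times.length := by
    simp [List.length_zip, Nat.min_eq_left hlen]
  intro fuel
  induction fuel with
  | zero =>
    intro i hf
    have hdrop : (times.zip sents).drop i = [] := by
      apply List.drop_eq_nil_of_le; omega
    simp [mergeDupOuterA, hdrop, mergeCanon]
  | succ fuel ih =>
    intro i hf
    by_cases hil : i < times.length
    · have his : i < sents.length := lt_of_lt_of_le hil hlen
      have hiz : i < (times.zip sents).length := by omega
      have hdrop : (times.zip sents).drop i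
          = (times[i], sents[i]) :: (times.zip sents).drop (i + 1) := by
        rw [List.drop_eq_getElem_cons hiz]
        congr 1
        simp [List.getElem_zip]
      simp only [mergeDupOuterA, if_pos hil]
      rw [innerA_eq_run times sents hlen times.length (i + 1) _ _ (by omega) (by omega)]
      set r := mergeRun (times.getD i 0) (sents.getD i "") ((times.zip sents).drop (i + 1)) with hr
      have hsuf : r.2 <:+ (times.zip sents) :=
        (mergeRun_suffix _ _ _).trans (List.drop_suffix _ _)
      have hdr : (times.zip sents).drop (times.length - r.2.length) = r.2 := by
        have := suffix_drop_eq hsuf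
        rwa [hz] at this
      have hrl : r.2.length ≤ times.length - (i + 1) := by
        have h1 := mergeRun_length (times.getD i 0) (sents.getD i "")
          ((times.zip sents).drop (i + 1))
        have h2 : ((times.zip sents).drop (i + 1)).length = times.length - (i + 1) := by
          simp [hz]
        rw [h2] at h1
        exact h1
      rw [ih (times.length - r.2.length) (by omega), hdr, hdrop]
      rw [List.getD_eq_getElem _ _ hil, List.getD_eq_getElem _ _ his] at hr
      simp [mergeCanon, ← hr]
    · have hdrop : (times.zip sents).drop i = [] := by
        apply List.drop_eq_nil_of_le; omega
      simp [mergeDupOuterA, hil, hdrop, mergeCanon]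

-- ===== VERDICT =====
theorem merge_dup_spec : Claim_equal_merge_dup := by
  intro times sentences _ hpre
  unfold Spec_merge_dup merge_dup merge_dup_alt
  rw [outerA_eq_canon times sentences hpre times.length 0 (by omega),
      loopB_eq_canon]
  simp
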